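-- pv_equiv track=rewrite | github.com/PedroA-Gondim/Auditoria-e-Seguranca | src/enc.py | transposicao_colunar
-- ===== SOURCE A (Python) =====
-- def transposicao_colunar(bits, num_colunas=4):
--     """
--     ETAPA DE DIFUSÃO ESPACIAL: Reorganiza os bits lendo por coluna em vez de linha.
--     Isso espalha a influência dos bits por toda a estrutura (difusão).
--
--     Exemplo com 16 bits em 4 colunas:
--     Entrada: [b0, b1, b2, b3, b4, b5, b6, b7, ...]
--     Organiza em matriz 4x4 e lê por coluna
--     """
--     tamanho = len(bits)
--     num_linhas = (tamanho + num_colunas - 1) // num_colunas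
--     saida = []
--
--     # Lê coluna por coluna da matriz
--     for coluna in range(num_colunas):
--         for linha in range(num_linhas):
--             idx = linha * num_colunas + coluna
--             if idx < tamanho:
--                 saida.append(bits[idx])
--
--     return saida
-- ===== SOURCE B (Python) =====
-- def transposicao_colunar(bits, num_colunas=4):
--     # Chunk into rows of num_colunas, then read column by column (matrix transpose).
--     rows = [bits[i:i + num_colunas] for i in range(0, len(bits), num_colunas)]
--     return [row[c] for c in range(num_colunas) for row in rows if c < len(row)]
-- ===== Notes on version B (the rewrite author's own statement) =====
-- stated objective: idiomatic
-- what changed: B materializes the matrix by chunking the bits into rows of num_colunas and then transposes it (reading entry c of every long-enough row), instead of A's nested index loops computing flat indices linha*num_colunas+coluna with a bounds check.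
import Mathlib
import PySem

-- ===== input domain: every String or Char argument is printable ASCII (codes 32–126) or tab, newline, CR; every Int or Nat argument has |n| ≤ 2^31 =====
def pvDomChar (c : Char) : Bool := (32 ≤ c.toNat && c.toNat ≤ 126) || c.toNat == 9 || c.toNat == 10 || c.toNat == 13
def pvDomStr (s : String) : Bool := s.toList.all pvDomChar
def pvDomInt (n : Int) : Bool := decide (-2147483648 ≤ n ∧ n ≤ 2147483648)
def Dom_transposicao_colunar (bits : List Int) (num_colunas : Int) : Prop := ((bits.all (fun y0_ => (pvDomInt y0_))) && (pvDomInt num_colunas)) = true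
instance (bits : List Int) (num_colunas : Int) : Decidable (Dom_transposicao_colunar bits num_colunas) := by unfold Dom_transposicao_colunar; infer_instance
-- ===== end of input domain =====

-- B reorganizes the same columnar read as an explicit chunk-into-rows + transpose instead of
-- flat-index arithmetic with a bounds check (objective: idiomatic decomposition, same cost).

-- ===== PORT A =====
def transposicao_colunar (bits : List Int) (num_colunas : Int) : List Int :=
  let tamanho : Int := bits.length
  let num_linhas : Int := PySem.Int.floordiv (tamanho + num_colunas - 1) num_colunas
  (PySem.List.pyRange 0 num_colunas 1).foldl (fun saida coluna =>
    (PySem.List.pyRange 0 num_linhas 1).foldl (fun saida linha =>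
      let idx := linha * num_colunas + coluna
      if idx < tamanho then saida ++ [PySem.List.pyGetD bits idx 0] else saida) saida) []

-- ===== PORT B =====
def transposicao_colunar_alt (bits : List Int) (num_colunas : Int) : List Int :=
  let rows : List (List Int) :=
    (PySem.List.pyRange 0 (bits.length : Int) num_colunas).map
      (fun i => PySem.List.slice bits (some i) (some (i + num_colunas)))
  (PySem.List.pyRange 0 num_colunas 1).foldl (fun acc c =>
    acc ++ (rows.filter (fun row => decide (c < (row.length : Int)))).map
      (fun row => PySem.List.pyGetD row c 0)) []

-- ===== PRECONDITION & SPEC =====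
-- Pre_ excludes exactly num_colunas = 0, where the Python A raises ZeroDivisionError (and B raises too).
def Pre_transposicao_colunar (bits : List Int) (num_colunas : Int) : Prop := num_colunas ≠ 0
instance (bits : List Int) (num_colunas : Int) : Decidable (Pre_transposicao_colunar bits num_colunas) := by unfold Pre_transposicao_colunar; infer_instance
def pvWitness_transposicao_colunar : List Int × Int := ([1, 0, 1, 1, 0, 1], 4)

def Spec_transposicao_colunar (bits : List Int) (num_colunas : Int) (out : List Int) : Prop := out = transposicao_colunar_alt bits num_colunas
instance (bits : List Int) (num_colunas : Int) (out : List Int) : Decidable (Spec_transposicao_colunar bits num_colunas out) := by unfold Spec_transposicao_colunar; infer_instance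

-- ===== CLAIM (what is proved, stated in full; the proofs are below) =====
def Claim_equal_transposicao_colunar : Prop := ∀ (bits : List Int) (num_colunas : Int), Dom_transposicao_colunar bits num_colunas → Pre_transposicao_colunar bits num_colunas → Spec_transposicao_colunar bits num_colunas (transposicao_colunar bits num_colunas)

-- ===== LEMMAS AND PROOFS =====

-- Common count of rows: for positive k, both the A-side row range and the B-side chunk list
-- have cnt = ceil(L/k) entries.
theorem pv_cnt_eq (L k : Nat) (hk : 0 < k) :
    PySem.List.pyRange 0 (PySem.Int.floordiv ((L : Int) + (k : Int) - 1) (k : Int)) 1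
      = List.map (fun m : Nat => (m : Int)) (List.range ((L + k - 1) / k)) := by
  have hdiv : PySem.Int.floordiv ((L : Int) + (k : Int) - 1) (k : Int) = (((L + k - 1) / k : Nat) : Int) := by
    have : ((L : Int) + (k : Int) - 1) = ((L + k - 1 : Nat) : Int) := by omega
    rw [this]
    exact_mod_cast PySem.Int.floordiv_natCast (L + k - 1) k
  rw [hdiv, PySem.List.pyRange_one]
  simp only [zero_add, sub_zero, Int.toNat_natCast]

-- B-side chunk starts: pyRange 0 L k enumerates the multiples m*k for m < ceil(L/k).
theorem pv_chunk_starts (L k : Nat) (hk : 0 < k) :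
    PySem.List.pyRange 0 (L : Int) (k : Int)
      = List.map (fun m : Nat => ((m * k : Nat) : Int)) (List.range ((L + k - 1) / k)) := by
  rw [PySem.List.pyRange_of_pos 0 (L : Int) (by exact_mod_cast hk)]
  by_cases hL : 0 < L
  · have hlt : (0 : Int) < (L : Int) := by exact_mod_cast hL
    rw [if_pos hlt]
    have : (((L : Int) - 0 + (k : Int) - 1) / (k : Int)).toNat = (L + k - 1) / k := by
      have h1 : ((L : Int) - 0 + (k : Int) - 1) = ((L + k - 1 : Nat) : Int) := by omega
      rw [h1, ← Int.natCast_div, Int.toNat_natCast]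
    rw [this]
    apply List.map_congr_left
    intro m _
    push_cast; ring
  · have hL0 : L = 0 := by omega
    subst hL0
    rw [if_neg (by exact_mod_cast hL)]
    have h2 : (0 + k - 1) / k = 0 := Nat.div_eq_of_lt (by omega)
    rw [h2]
    simp

-- Per-column agreement for a fixed column c < k: A's filtered flat-index read equals
-- B's read of entry c from each long-enough chunk.
theorem pv_col_eq (bits : List Int) (k : Nat) (hk : 0 < k) (c : Nat) (hc : c < k) :
    List.map (fun row => PySem.List.pyGetD row (c : Int) 0)
      (List.filter (fun row => decide ((c : Int) < (row.length : Int)))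
        (List.map (fun m : Nat => PySem.List.slice bits (some ((m * k : Nat) : Int)) (some (((m * k : Nat) : Int) + (k : Int))))
          (List.range ((bits.length + k - 1) / k))))
      =
    List.map (fun l => PySem.List.pyGetD bits (l * (k : Int) + (c : Int)) 0)
      (List.filter (fun l => decide (l * (k : Int) + (c : Int) < (bits.length : Int)))
        (List.map (fun m : Nat => (m : Int)) (List.range ((bits.length + k - 1) / k)))) := by
  rw [List.filter_map, List.filter_map, List.map_map, List.map_map]
  have hrow : ∀ m : Nat, PySem.List.slice bits (some ((m * k : Nat) : Int)) (some (((m * k : Nat) : Int) + (k : Int)))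
      = (bits.drop (m * k)).take k := by
    intro m
    exact PySem.List.slice_natCast_add bits (m * k) k
  have hlen : ∀ m : Nat, ((bits.drop (m * k)).take k).length = min k (bits.length - m * k) := by
    intro m; simp
  -- the two filters agree
  have hfil : (List.range ((bits.length + k - 1) / k)).filter
        ((fun row => decide ((c : Int) < (row.length : Int))) ∘
          (fun m : Nat => PySem.List.slice bits (some ((m * k : Nat) : Int)) (some (((m * k : Nat) : Int) + (k : Int)))))
      = (List.range ((bits.length + k - 1) / k)).filter
        ((fun l => decide (l * (k : Int) + (c : Int) < (bits.length : Int))) ∘ (fun m : Nat => (m : Int))) := by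
    apply List.filter_congr
    intro m _
    simp only [Function.comp, hrow, hlen]
    have h1 : ((c : Int) < ((min k (bits.length - m * k) : Nat) : Int)) ↔ (m : Int) * (k : Int) + (c : Int) < (bits.length : Int) := by
      push_cast
      omega
    simp only [decide_eq_decide]
    exact h1
  rw [hfil]
  apply List.map_congr_left
  intro m hm
  simp only [List.mem_filter, Function.comp, List.mem_range] at hm
  obtain ⟨hmr, hcond⟩ := hm
  have hidx : m * k + c < bits.length := by
    have := of_decide_eq_true hcond
    push_cast at this
    omega
  simp only [Function.comp, hrow]
  rw [PySem.List.pyGetD_natCast]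
  have hmc : (m : Int) * (k : Int) + (c : Int) = ((m * k + c : Nat) : Int) := by push_cast; ring
  rw [hmc, PySem.List.pyGetD_natCast]
  rw [List.getD_eq_getElem?_getD, List.getD_eq_getElem?_getD]
  rw [List.getElem?_take, List.getElem?_drop]
  rw [if_pos hc]

-- Both ports flatten to the same column-by-column flatMap when num_colunas > 0.
theorem pv_pos_case (bits : List Int) (k : Nat) (hk : 0 < k) :
    transposicao_colunar bits (k : Int) = transposicao_colunar_alt bits (k : Int) := by
  unfold transposicao_colunar transposicao_colunar_alt
  simp only []
  -- reshape A's nested foldl into a flatMap of filtered maps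
  have hA : ∀ (cs : List Int) (acc : List Int),
      cs.foldl (fun saida coluna =>
        (PySem.List.pyRange 0 (PySem.Int.floordiv ((bits.length : Int) + (k : Int) - 1) (k : Int)) 1).foldl
          (fun saida linha =>
            if linha * (k : Int) + coluna < (bits.length : Int) then saida ++ [PySem.List.pyGetD bits (linha * (k : Int) + coluna) 0] else saida) saida) acc
      = acc ++ cs.flatMap (fun coluna =>
          ((PySem.List.pyRange 0 (PySem.Int.floordiv ((bits.length : Int) + (k : Int) - 1) (k : Int)) 1).filter
            (fun linha => decide (linha * (k : Int) + coluna < (bits.length : Int)))).map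
            (fun linha => PySem.List.pyGetD bits (linha * (k : Int) + coluna) 0)) := by
    intro cs acc
    rw [← PySem.List.foldl_append_eq_flatMap]
    apply PySem.List.foldl_congr_mem
    intro b x _
    simpa using PySem.List.foldl_append_if (fun linha => decide (linha * (k : Int) + x < (bits.length : Int)))
      (fun linha => PySem.List.pyGetD bits (linha * (k : Int) + x) 0)
      (PySem.List.pyRange 0 (PySem.Int.floordiv ((bits.length : Int) + (k : Int) - 1) (k : Int)) 1) b
  have hB : ∀ (cs : List Int) (acc : List Int) (rows : List (List Int)),
      cs.foldl (fun acc c =>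
        acc ++ (rows.filter (fun row => decide (c < (row.length : Int)))).map
          (fun row => PySem.List.pyGetD row c 0)) acc
      = acc ++ cs.flatMap (fun c =>
          (rows.filter (fun row => decide (c < (row.length : Int)))).map
            (fun row => PySem.List.pyGetD row c 0)) := by
    intro cs acc rows
    exact PySem.List.foldl_append_eq_flatMap _ cs acc
  rw [hA, hB]
  simp only [List.nil_append]
  apply List.flatMap_congr
  intro c hc
  rw [PySem.List.mem_pyRange_one] at hc
  obtain ⟨hc0, hck⟩ := hc
  obtain ⟨cn, rfl⟩ := Int.eq_ofNat_of_zero_le hc0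
  have hcn : cn < k := by exact_mod_cast hck
  rw [pv_cnt_eq bits.length k hk, pv_chunk_starts bits.length k hk]
  rw [List.map_map]
  exact (pv_col_eq bits k hk cn hcn).symm

-- ===== VERDICT (by name: the statement is the Claim_ definition above) =====
theorem transposicao_colunar_spec : Claim_equal_transposicao_colunar := by
  intro bits num_colunas _ hpre
  unfold Spec_transposicao_colunar
  rcases lt_trichotomy num_colunas 0 with hneg | hzero | hpos
  · -- negative column count: both outer loops run over an empty range
    unfold transposicao_colunar transposicao_colunar_alt
    rw [PySem.List.pyRange_one_eq_nil (by omega)]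
    simp
  · exact absurd hzero hpre
  · obtain ⟨k, rfl⟩ := Int.eq_ofNat_of_zero_le (le_of_lt hpos)
    have hk : 0 < k := by exact_mod_cast hpos
    exact pv_pos_case bits k hk
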